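-- pv_equiv track=rewrite | github.com/tinmanSimon/photoAssemble | main.py | matchRows
-- ===== SOURCE A (Python) =====
-- def matchRows(targetPixelsRow, assemblePixels, useDistinctImages = False):
--     newImgRow, impossibleVal = [], (-500, -500, -500)
--     for targetPixel in targetPixelsRow:
--         matchI, matchDiff = -1, -1
--         for j, assemblePixel in enumerate(assemblePixels):
--             curDiff = sum([abs(a - b) ** 2 for a, b in zip(targetPixel, assemblePixel)])
--             if matchI < 0 or curDiff < matchDiff:
--                 matchDiff = curDiff
--                 matchI = j
--         if useDistinctImages: assemblePixel[matchI] = impossibleVal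
--         newImgRow.append(matchI)
--     return newImgRow
-- ===== SOURCE B (Python) =====
-- def matchRows(targetPixelsRow, assemblePixels, useDistinctImages=False):
--     # Nearest-match index per target pixel, scanning only DISTINCT assemble
--     # pixel values (first-occurrence index kept in a dict), picking the
--     # lexicographically least (distance, first index) pair.
--     # Return-value equivalence only: the useDistinctImages in-place mutation
--     # quirk of the original (writing a tuple sentinel into assemblePixels)
--     # is not reproduced.
--     first = {}
--     for j, p in enumerate(assemblePixels):
--         first.setdefault(tuple(p), j)
--     items = list(first.items())
--
--     def dist(t, p):
--         return sum((a - b) ** 2 for a, b in zip(t, p))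
--
--     row = []
--     for t in targetPixelsRow:
--         best = min(items, key=lambda kj: (dist(t, kj[0]), kj[1]), default=(None, -1))
--         row.append(best[1])
--     return row
-- ===== Notes on version B (the rewrite author's own statement) =====
-- stated objective: alternative
-- what changed: B replaces A's sentinel-accumulator scan over all assemble pixels with a first-index dict over distinct pixel values and a single min by the lexicographic (distance, first-index) key per target (scanning only distinct values); B does not reproduce A's useDistinctImages in-place tuple-sentinel mutation, which Pre_ excludes.
-- outside the precondition, e.g. on matchRows([(0,)], [(1,), (2,)], True): A raises TypeError, B returns [0]; on matchRows([(1,), (1,)], [(1,), (2,)], True): A raises TypeError, B returns [0, 0]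
import Mathlib
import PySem

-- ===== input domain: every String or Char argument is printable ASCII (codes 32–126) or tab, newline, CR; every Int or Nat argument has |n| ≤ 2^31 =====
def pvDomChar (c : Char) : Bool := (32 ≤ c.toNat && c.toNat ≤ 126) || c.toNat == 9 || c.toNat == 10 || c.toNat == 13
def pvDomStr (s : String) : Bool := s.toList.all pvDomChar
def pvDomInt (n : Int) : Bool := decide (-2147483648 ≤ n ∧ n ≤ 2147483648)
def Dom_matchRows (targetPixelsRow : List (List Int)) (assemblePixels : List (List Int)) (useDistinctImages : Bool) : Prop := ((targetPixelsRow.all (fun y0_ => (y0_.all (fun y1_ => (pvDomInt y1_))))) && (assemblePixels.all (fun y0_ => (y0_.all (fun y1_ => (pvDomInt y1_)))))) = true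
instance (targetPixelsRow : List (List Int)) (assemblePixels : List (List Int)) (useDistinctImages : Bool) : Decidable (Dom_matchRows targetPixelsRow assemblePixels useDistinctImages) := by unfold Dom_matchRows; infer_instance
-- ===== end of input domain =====

-- B replaces A's sentinel-accumulator scan over all assemble pixels with a first-index
-- dict over distinct pixel values and one lexicographic (distance, first-index) min per
-- target (objective: alternative). Return-value equivalence only: A's useDistinctImages
-- in-place mutation is excluded by Pre_ and not reproduced.


-- ===== PORT A =====
-- curDiff = sum([abs(a - b) ** 2 for a, b in zip(targetPixel, assemblePixel)])
def pvCurDiff (targetPixel assemblePixel : List Int) : Int :=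
  ((targetPixel.zip assemblePixel).map (fun ab => |ab.1 - ab.2| ^ 2)).sum

def matchRows (targetPixelsRow : List (List Int)) (assemblePixels : List (List Int)) (useDistinctImages : Bool) : List Int :=
  -- for targetPixel in targetPixelsRow: inner loop over enumerate(assemblePixels)
  -- with state (matchI, matchDiff) starting at (-1, -1); then append matchI.
  -- The line 'if useDistinctImages: assemblePixel[matchI] = impossibleVal' writes a
  -- tuple sentinel (out of type List Int) into a Python list; Pre_matchRows confines
  -- the claim to inputs on which that line never executes, so it has no port.
  targetPixelsRow.foldl
    (fun newImgRow targetPixel =>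
      newImgRow ++
        [((PySem.List.enumerate assemblePixels).foldl
            (fun s jp =>
              if s.1 < 0 ∨ pvCurDiff targetPixel jp.2 < s.2 then (jp.1, pvCurDiff targetPixel jp.2) else s)
            (-1, -1)).1])
    []

-- ===== PORT B =====
-- dist(t, p) = sum((a - b) ** 2 for a, b in zip(t, p))
def pvDist (t p : List Int) : Int :=
  ((t.zip p).map (fun ab => (ab.1 - ab.2) ^ 2)).sum

def matchRows_alt (targetPixelsRow : List (List Int)) (assemblePixels : List (List Int)) (useDistinctImages : Bool) : List Int :=
  -- first = {}; for j, p in enumerate(assemblePixels): first.setdefault(tuple(p), j)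
  let first : PySem.Dict (List Int) Int :=
    (PySem.List.enumerate assemblePixels).foldl (fun d jp => d.setdefault jp.2 jp.1) PySem.Dict.empty
  let items := first.items
  -- for t: min(items, key=lambda kj: (dist(t, kj[0]), kj[1]), default=(None, -1))[1]
  targetPixelsRow.foldl
    (fun row t =>
      row ++
        [match PySem.List.min2? items (fun kj => pvDist t kj.1) (fun kj => kj.2) with
         | some kj => kj.2
         | none => -1])
    []

-- ===== PRECONDITION & SPEC =====
-- Pre_ excludes useDistinctImages = True with a nonempty target row: there A mutates
-- assemblePixels in place with a (-500,-500,-500) tuple sentinel — a value outside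
-- List Int, unrepresentable under the type convention — and on later pixels usually
-- raises TypeError/IndexError/UnboundLocalError; when it does return, the mutated
-- entry was never read.
def Pre_matchRows (targetPixelsRow : List (List Int)) (assemblePixels : List (List Int)) (useDistinctImages : Bool) : Prop :=
  useDistinctImages = false ∨ targetPixelsRow = []
instance (targetPixelsRow : List (List Int)) (assemblePixels : List (List Int)) (useDistinctImages : Bool) : Decidable (Pre_matchRows targetPixelsRow assemblePixels useDistinctImages) := by unfold Pre_matchRows; infer_instance

def pvWitness_matchRows : List (List Int) × List (List Int) × Bool :=
  ([[1, 2], [5, 5]], [[0, 0], [1, 2], [1, 2]], false)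

def Spec_matchRows (targetPixelsRow : List (List Int)) (assemblePixels : List (List Int)) (useDistinctImages : Bool) (out : List Int) : Prop := out = matchRows_alt targetPixelsRow assemblePixels useDistinctImages
instance (targetPixelsRow : List (List Int)) (assemblePixels : List (List Int)) (useDistinctImages : Bool) (out : List Int) : Decidable (Spec_matchRows targetPixelsRow assemblePixels useDistinctImages out) := by unfold Spec_matchRows; infer_instance

-- ===== CLAIM (what is proved, stated in full; the proofs are below) =====
def Claim_equal_matchRows : Prop := ∀ (targetPixelsRow : List (List Int)) (assemblePixels : List (List Int)) (useDistinctImages : Bool), Dom_matchRows targetPixelsRow assemblePixels useDistinctImages → Pre_matchRows targetPixelsRow assemblePixels useDistinctImages → Spec_matchRows targetPixelsRow assemblePixels useDistinctImages (matchRows targetPixelsRow assemblePixels useDistinctImages)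

-- ===== LEMMAS AND PROOFS =====

theorem pvCurDiff_eq_pvDist (t p : List Int) : pvCurDiff t p = pvDist t p := by
  simp [pvCurDiff, pvDist, sq_abs]

def pvLexLE (a b : Int × Int) : Prop := a.1 < b.1 ∨ (a.1 = b.1 ∧ a.2 ≤ b.2)
theorem pvLexLE_trans {a b c : Int × Int} (h1 : pvLexLE a b) (h2 : pvLexLE b c) : pvLexLE a c := by
  unfold pvLexLE at *; omega
theorem min2_go {α : Type} (k1 k2 : α → Int) :
    ∀ (l : List α) (m0 m : α),
      l.foldl
        (fun acc x =>
          match acc with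
          | none => some x
          | some m =>
            if (decide (k1 x < k1 m) || !decide (k1 m < k1 x) && decide (k2 x < k2 m)) = true then some x else some m)
        (some m0) = some m →
      (m = m0 ∨ m ∈ l) ∧ pvLexLE (k1 m, k2 m) (k1 m0, k2 m0) ∧ ∀ x ∈ l, pvLexLE (k1 m, k2 m) (k1 x, k2 x) := by
  intro l
  induction l with
  | nil => intro m0 m h; simp at h; subst h; simp [pvLexLE]
  | cons x l ih =>
    intro m0 m h
    simp only [List.foldl_cons] at h
    by_cases hc : (decide (k1 x < k1 m0) || !decide (k1 m0 < k1 x) && decide (k2 x < k2 m0)) = true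
    · rw [if_pos hc] at h
      obtain ⟨h1, h2, h3⟩ := ih x m h
      have hx0 : pvLexLE (k1 x, k2 x) (k1 m0, k2 m0) := by
        simp only [Bool.or_eq_true, Bool.and_eq_true, Bool.not_eq_true', decide_eq_true_eq, decide_eq_false_iff_not] at hc
        unfold pvLexLE; omega
      refine ⟨Or.inr (by
        rcases h1 with rfl | h1
        · exact List.mem_cons_self ..
        · exact List.mem_cons_of_mem _ h1), pvLexLE_trans h2 hx0, ?_⟩
      intro y hy
      rcases List.mem_cons.mp hy with rfl | hy
      · exact h2
      · exact h3 y hy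
    · rw [if_neg hc] at h
      obtain ⟨h1, h2, h3⟩ := ih m0 m h
      have hx0 : pvLexLE (k1 m0, k2 m0) (k1 x, k2 x) := by
        simp only [Bool.or_eq_true, Bool.and_eq_true, Bool.not_eq_true', decide_eq_true_eq, decide_eq_false_iff_not] at hc
        unfold pvLexLE
        rw [not_or, not_and] at hc
        omega
      refine ⟨by
        rcases h1 with rfl | h1
        · exact Or.inl rfl
        · exact Or.inr (List.mem_cons_of_mem _ h1), h2, ?_⟩
      intro y hy
      rcases List.mem_cons.mp hy with rfl | hy
      · exact pvLexLE_trans h2 hx0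
      · exact h3 y hy

theorem min2_isMin {α : Type} (k1 k2 : α → Int) (l : List α) (m : α)
    (h : PySem.List.min2? l k1 k2 = some m) :
    m ∈ l ∧ ∀ x ∈ l, pvLexLE (k1 m, k2 m) (k1 x, k2 x) := by
  unfold PySem.List.min2? at h
  cases l with
  | nil => simp at h
  | cons x l =>
    simp only [List.foldl_cons] at h
    obtain ⟨h1, _, h3⟩ := min2_go k1 k2 l x m h
    have hmx : m ∈ x :: l := by
      rcases h1 with rfl | h1
      · exact List.mem_cons_self ..
      · exact List.mem_cons_of_mem _ h1
    refine ⟨hmx, ?_⟩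
    intro y hy
    rcases List.mem_cons.mp hy with rfl | hy
    · exact (min2_go k1 k2 l y m h).2.1
    · exact h3 y hy

def pvFirsts : List (Int × List Int) → List (List Int) → List (List Int × Int)
  | [], _ => []
  | (j, p) :: l, seen => if p ∈ seen then pvFirsts l seen else (p, j) :: pvFirsts l (p :: seen)

theorem pvFirsts_congr : ∀ (l : List (Int × List Int)) (s s' : List (List Int)),
    (∀ x, x ∈ s ↔ x ∈ s') → pvFirsts l s = pvFirsts l s' := by
  intro l
  induction l with
  | nil => intro s s' _; rfl
  | cons x l ih =>
    intro s s' hss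
    obtain ⟨j, p⟩ := x
    simp only [pvFirsts]
    by_cases hp : p ∈ s
    · rw [if_pos hp, if_pos ((hss p).mp hp)]
      exact ih s s' hss
    · rw [if_neg hp, if_neg (fun hc => hp ((hss p).mpr hc))]
      refine congrArg _ (ih _ _ ?_)
      intro y; simp [hss y]

theorem items_fold_eq_pvFirsts : ∀ (l : List (Int × List Int)) (d : PySem.Dict (List Int) Int),
    (l.foldl (fun d jp => d.setdefault jp.2 jp.1) d).items = d.items ++ pvFirsts l (d.items.map Prod.fst) := by
  intro l
  induction l with
  | nil => intro d; simp [pvFirsts]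
  | cons x l ih =>
    intro d
    obtain ⟨j, p⟩ := x
    simp only [List.foldl_cons]
    by_cases hc : d.contains p = true
    · rw [ih (d.setdefault p j)]
      have hset : d.setdefault p j = d := PySem.Dict.setdefault_of_contains d j hc
      rw [hset]
      have hp : p ∈ d.items.map Prod.fst := by
        have := (PySem.Dict.contains_iff_mem_keys (d := d) (k := p)).mp hc
        simpa [PySem.Dict.keys] using this
      simp only [pvFirsts, if_pos hp]
    · rw [ih (d.setdefault p j)]
      have hset : d.setdefault p j = d.insert p j := PySem.Dict.setdefault_of_not_contains d j (by simpa using hc)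
      have hit : (d.insert p j).items = d.items ++ [(p, j)] := PySem.Dict.items_insert_of_not_contains d j (by simpa using hc)
      rw [hset, hit]
      have hp : p ∉ d.items.map Prod.fst := by
        intro hmem
        exact hc ((PySem.Dict.contains_iff_mem_keys (d := d) (k := p)).mpr (by simpa [PySem.Dict.keys] using hmem))
      simp only [pvFirsts, if_neg hp, List.map_append, List.append_assoc, List.singleton_append, List.map_cons, List.map_nil]
      refine congrArg _ (congrArg _ (pvFirsts_congr _ _ _ ?_))
      intro y; simp [or_comm]

theorem mem_pvFirsts : ∀ (l : List (Int × List Int)) (seen : List (List Int)) (p : List Int) (j : Int),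
    (p, j) ∈ pvFirsts l seen → (j, p) ∈ l := by
  intro l
  induction l with
  | nil => intro seen p j h; simp [pvFirsts] at h
  | cons x l ih =>
    intro seen p j h
    obtain ⟨j0, p0⟩ := x
    simp only [pvFirsts] at h
    by_cases hp : p0 ∈ seen
    · rw [if_pos hp] at h
      exact List.mem_cons_of_mem _ (ih seen p j h)
    · rw [if_neg hp] at h
      rcases List.mem_cons.mp h with heq | h
      · cases heq
        exact List.mem_cons_self ..
      · exact List.mem_cons_of_mem _ (ih _ p j h)

theorem pvFirsts_mem_of_first : ∀ (l : List (Int × List Int)) (seen : List (List Int)) (j : Int) (p : List Int),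
    l.Pairwise (fun a b => a.1 < b.1) → (j, p) ∈ l → p ∉ seen →
    (∀ x ∈ l, x.2 = p → j ≤ x.1) → (p, j) ∈ pvFirsts l seen := by
  intro l
  induction l with
  | nil => intro seen j p _ h; simp at h
  | cons x l ih =>
    intro seen j p hpw hmem hseen hfirst
    obtain ⟨j0, p0⟩ := x
    simp only [pvFirsts]
    rcases List.mem_cons.mp hmem with heq | hmem'
    · cases heq
      rw [if_neg hseen]
      exact List.mem_cons_self ..
    · have hj0j : j0 < j := by
        have := (List.pairwise_cons.mp hpw).1 (j, p) hmem'
        simpa using this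
      have hne : p ≠ p0 := by
        intro hpe
        have := hfirst (j0, p0) (List.mem_cons_self ..) (by simpa using hpe.symm)
        omega
      by_cases hp : p0 ∈ seen
      · rw [if_pos hp]
        exact ih seen j p (List.pairwise_cons.mp hpw).2 hmem' hseen
          (fun x hx h2 => hfirst x (List.mem_cons_of_mem _ hx) h2)
      · rw [if_neg hp]
        refine List.mem_cons_of_mem _ (ih _ j p (List.pairwise_cons.mp hpw).2 hmem' ?_
          (fun x hx h2 => hfirst x (List.mem_cons_of_mem _ hx) h2))
        simp [hseen, hne]


def pvAccState (t : List Int) : Option (Int × List Int) → Int × Int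
  | none => (-1, -1)
  | some m => (m.1, pvCurDiff t m.2)

theorem foldA_couple (t : List Int) :
    ∀ (l : List (Int × List Int)) (acc : Option (Int × List Int)),
      (∀ m, acc = some m → 0 ≤ m.1 ∧ ∀ x ∈ l, m.1 < x.1) →
      (∀ x ∈ l, 0 ≤ x.1) →
      l.Pairwise (fun a b => a.1 < b.1) →
      l.foldl
        (fun s jp =>
          if s.1 < 0 ∨ pvCurDiff t jp.2 < s.2 then (jp.1, pvCurDiff t jp.2) else s)
        (pvAccState t acc)
        = pvAccState t
            (l.foldl
              (fun acc x =>
                match acc with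
                | none => some x
                | some m =>
                  if (decide (pvCurDiff t x.2 < pvCurDiff t m.2) || !decide (pvCurDiff t m.2 < pvCurDiff t x.2) && decide (x.1 < m.1)) = true then some x else some m)
              acc) := by
  intro l
  induction l with
  | nil => intro acc _ _ _; rfl
  | cons x l ih =>
    intro acc hacc hpos hpw
    simp only [List.foldl_cons]
    cases acc with
    | none =>
      have h1 : pvAccState t none = (-1, -1) := rfl
      rw [h1]
      have hcond : ((-1 : Int), (-1 : Int)).1 < 0 ∨ pvCurDiff t x.2 < ((-1 : Int), (-1 : Int)).2 := Or.inl (by norm_num)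
      rw [if_pos hcond]
      have h2 : ((x.1 : Int), pvCurDiff t x.2) = pvAccState t (some x) := rfl
      rw [h2]
      exact ih (some x)
        (fun m hm => by
          cases hm
          exact ⟨hpos x (List.mem_cons_self ..), fun y hy => (List.pairwise_cons.mp hpw).1 y hy⟩)
        (fun y hy => hpos y (List.mem_cons_of_mem _ hy))
        (List.pairwise_cons.mp hpw).2
    | some m =>
      obtain ⟨hm0, hmlt⟩ := hacc m rfl
      have hstep : (match some m with
          | none => some x
          | some m' =>
            (if (decide (pvCurDiff t x.2 < pvCurDiff t m'.2) || !decide (pvCurDiff t m'.2 < pvCurDiff t x.2) && decide (x.1 < m'.1)) = true then some x else some m')) =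
          (if (decide (pvCurDiff t x.2 < pvCurDiff t m.2) || !decide (pvCurDiff t m.2 < pvCurDiff t x.2) && decide (x.1 < m.1)) = true then some x else some m) := rfl
      rw [hstep]
      have hxm : m.1 < x.1 := hmlt x (List.mem_cons_self ..)
      by_cases hlt : pvCurDiff t x.2 < pvCurDiff t m.2
      · have hcond : (pvAccState t (some m)).1 < 0 ∨ pvCurDiff t x.2 < (pvAccState t (some m)).2 := Or.inr hlt
        rw [if_pos hcond]
        have hb : (decide (pvCurDiff t x.2 < pvCurDiff t m.2) || !decide (pvCurDiff t m.2 < pvCurDiff t x.2) && decide (x.1 < m.1)) = true := by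
          simp [hlt]
        rw [if_pos hb]
        have h2 : ((x.1 : Int), pvCurDiff t x.2) = pvAccState t (some x) := rfl
        rw [h2]
        exact ih (some x)
          (fun m' hm' => by
            cases hm'
            exact ⟨hpos x (List.mem_cons_self ..), fun y hy => (List.pairwise_cons.mp hpw).1 y hy⟩)
          (fun y hy => hpos y (List.mem_cons_of_mem _ hy))
          (List.pairwise_cons.mp hpw).2
      · have hcond : ¬ ((pvAccState t (some m)).1 < 0 ∨ pvCurDiff t x.2 < (pvAccState t (some m)).2) := by
          simp only [pvAccState]
          rw [not_or]
          exact ⟨by omega, hlt⟩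
        rw [if_neg hcond]
        have hb : ¬ (decide (pvCurDiff t x.2 < pvCurDiff t m.2) || !decide (pvCurDiff t m.2 < pvCurDiff t x.2) && decide (x.1 < m.1)) = true := by
          simp [hlt]
          omega
        rw [if_neg hb]
        exact ih (some m)
          (fun m' hm' => by
            cases hm'
            exact ⟨hm0, fun y hy => hmlt y (List.mem_cons_of_mem _ hy)⟩)
          (fun y hy => hpos y (List.mem_cons_of_mem _ hy))
          (List.pairwise_cons.mp hpw).2

theorem min2_foldl_some {α : Type} (k1 k2 : α → Int) :
    ∀ (l : List α) (m0 : α), ∃ m, l.foldl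
        (fun acc x =>
          match acc with
          | none => some x
          | some m =>
            if (decide (k1 x < k1 m) || !decide (k1 m < k1 x) && decide (k2 x < k2 m)) = true then some x else some m)
        (some m0) = some m := by
  intro l
  induction l with
  | nil => intro m0; exact ⟨m0, rfl⟩
  | cons x l ih =>
    intro m0
    simp only [List.foldl_cons]
    by_cases hc : (decide (k1 x < k1 m0) || !decide (k1 m0 < k1 x) && decide (k2 x < k2 m0)) = true
    · rw [if_pos hc]; exact ih x
    · rw [if_neg hc]; exact ih m0

theorem min2_ne_none {α : Type} (k1 k2 : α → Int) (l : List α) (h : l ≠ []) :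
    ∃ m, PySem.List.min2? l k1 k2 = some m := by
  cases l with
  | nil => simp at h
  | cons x l =>
    unfold PySem.List.min2?
    simp only [List.foldl_cons]
    exact min2_foldl_some k1 k2 l x

theorem per_target (t : List Int) (assemblePixels : List (List Int)) :
    ((PySem.List.enumerate assemblePixels).foldl
        (fun s jp =>
          if s.1 < 0 ∨ pvCurDiff t jp.2 < s.2 then (jp.1, pvCurDiff t jp.2) else s)
        (-1, -1)).1
      = (match PySem.List.min2?
            (((PySem.List.enumerate assemblePixels).foldl (fun d jp => d.setdefault jp.2 jp.1) PySem.Dict.empty).items)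
            (fun kj => pvDist t kj.1) (fun kj => kj.2) with
         | some kj => kj.2
         | none => -1) := by
  have hpos : ∀ x ∈ PySem.List.enumerate assemblePixels, 0 ≤ x.1 := by
    intro x hx
    obtain ⟨k, hk, hpx⟩ := (PySem.List.mem_enumerate_iff _ _ x).mp hx
    simp [hpx]
  have hpw : (PySem.List.enumerate assemblePixels).Pairwise (fun a b => a.1 < b.1) :=
    PySem.List.pairwise_lt_enumerate ..
  have hL := foldA_couple t (PySem.List.enumerate assemblePixels) none (by simp) hpos hpw
  have hinit : ((-1 : Int), (-1 : Int)) = pvAccState t none := rfl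
  rw [hinit, hL]
  have hfold : (PySem.List.enumerate assemblePixels).foldl
      (fun acc x =>
        match acc with
        | none => some x
        | some m =>
          if (decide (pvCurDiff t x.2 < pvCurDiff t m.2) || !decide (pvCurDiff t m.2 < pvCurDiff t x.2) && decide (x.1 < m.1)) = true then some x else some m)
      none
      = PySem.List.min2? (PySem.List.enumerate assemblePixels) (fun jp => pvCurDiff t jp.2) (fun jp => jp.1) := by
    unfold PySem.List.min2?
    refine PySem.List.foldl_congr_mem _ _ _ _ ?_
    intro acc x hx
    cases acc <;> rfl
  rw [hfold]
  have hitems : ((PySem.List.enumerate assemblePixels).foldl (fun d jp => d.setdefault jp.2 jp.1) PySem.Dict.empty).items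
      = pvFirsts (PySem.List.enumerate assemblePixels) [] := by
    rw [items_fold_eq_pvFirsts]
    rfl
  rw [hitems]
  by_cases he : PySem.List.enumerate assemblePixels = []
  · rw [he]
    simp [pvFirsts, pvAccState, PySem.List.min2?]
  · obtain ⟨m, hmin⟩ := min2_ne_none (fun jp => pvCurDiff t jp.2) (fun jp => jp.1) _ he
    obtain ⟨hmem, hlexmin⟩ := min2_isMin (fun jp => pvCurDiff t jp.2) (fun jp => jp.1) _ m hmin
    have hfirst : ∀ x ∈ PySem.List.enumerate assemblePixels, x.2 = m.2 → m.1 ≤ x.1 := by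
      intro x hx hx2
      have := hlexmin x hx
      unfold pvLexLE at this
      simp only [hx2] at this
      omega
    have hmemItems : (m.2, m.1) ∈ pvFirsts (PySem.List.enumerate assemblePixels) [] := by
      refine pvFirsts_mem_of_first _ [] m.1 m.2 hpw ?_ (by simp) hfirst
      simpa using hmem
    obtain ⟨m', hmin2⟩ := min2_ne_none (fun kj => pvDist t kj.1) (fun kj => kj.2) _
      (List.ne_nil_of_mem hmemItems)
    obtain ⟨hmem', hlex'⟩ := min2_isMin (fun kj => pvDist t kj.1) (fun kj => kj.2) _ m' hmin2
    rw [hmin, hmin2]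
    have ha := hlex' (m.2, m.1) hmemItems
    have hb := hlexmin (m'.2, m'.1) (mem_pvFirsts _ [] m'.1 m'.2 (by simpa using hmem'))
    simp only [pvCurDiff_eq_pvDist] at hb
    simp only [pvAccState]
    unfold pvLexLE at ha hb
    simp only at ha hb
    omega

-- ===== VERDICT (by name: the statement is the Claim_ definition above) =====
theorem matchRows_spec : Claim_equal_matchRows := by
  intro tr ap u _ _
  unfold Spec_matchRows matchRows matchRows_alt
  rw [PySem.List.foldl_append_singleton_eq_map, PySem.List.foldl_append_singleton_eq_map]
  simp only [List.nil_append]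
  exact List.map_congr_left (fun t _ => per_target t ap)
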